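-- pv_equiv track=rewrite | github.com/dowonim323/untatiz | web/services/league_service.py | _normalize_league_date
-- ===== SOURCE A (Python) =====
-- from typing import Dict, List, Any, Tuple
--
-- def _normalize_league_date(requested_date: str, date_columns: List[str]) -> str:
--     if not date_columns:
--         return ''
--
--     if not requested_date:
--         return date_columns[-1]
--
--     if requested_date <= date_columns[0]:
--         return date_columns[0]
--
--     if requested_date >= date_columns[-1]:
--         return date_columns[-1]
--
--     if requested_date in date_columns:
--         return requested_date
--
--     earlier_dates = [date for date in date_columns if date <= requested_date]
--     return earlier_dates[-1] if earlier_dates else date_columns[0]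
-- ===== SOURCE B (Python) =====
-- def _normalize_league_date(requested_date, date_columns):
--     if not date_columns:
--         return ''
--     if not requested_date:
--         return date_columns[-1]
--     first = date_columns[0]
--     last = date_columns[-1]
--     if requested_date <= first:
--         return first
--     if requested_date >= last:
--         return last
--     candidate = None
--     for d in reversed(date_columns):
--         if d == requested_date:
--             return requested_date
--         if candidate is None and d < requested_date:
--             candidate = d
--     return candidate if candidate is not None else first
-- ===== Notes on version B (the rewrite author's own statement) =====
-- stated objective: alternative
-- what changed: Replaces A's membership test plus list-comprehension filter (several full passes, plus a materialized earlier_dates list) by a single backward scan with early exit that tracks the first element below the requested date.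
import Mathlib
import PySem

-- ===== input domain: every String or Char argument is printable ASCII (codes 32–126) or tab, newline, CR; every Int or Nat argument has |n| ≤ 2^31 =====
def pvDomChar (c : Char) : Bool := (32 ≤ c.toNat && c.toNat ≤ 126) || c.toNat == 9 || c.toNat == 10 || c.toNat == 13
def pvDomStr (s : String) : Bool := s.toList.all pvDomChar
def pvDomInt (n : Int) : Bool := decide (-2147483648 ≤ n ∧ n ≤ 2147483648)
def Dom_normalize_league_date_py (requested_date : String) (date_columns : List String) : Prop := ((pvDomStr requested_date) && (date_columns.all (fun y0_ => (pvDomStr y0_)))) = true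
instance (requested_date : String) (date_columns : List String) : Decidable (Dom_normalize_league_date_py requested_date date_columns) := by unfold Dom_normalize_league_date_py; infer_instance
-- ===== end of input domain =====

-- B replaces A's membership test + filter comprehension by one backward scan with early exit; return value only.
-- ===== PORT A =====
def normalize_league_date_py (requested_date : String) (date_columns : List String) : String :=
  if date_columns = [] then ""
  else if requested_date = "" then PySem.List.pyGetD date_columns (-1) ""
  else if requested_date ≤ PySem.List.pyGetD date_columns 0 "" then PySem.List.pyGetD date_columns 0 ""
  else if PySem.List.pyGetD date_columns (-1) "" ≤ requested_date then PySem.List.pyGetD date_columns (-1) ""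
  else if requested_date ∈ date_columns then requested_date
  else
    let earlier_dates := date_columns.filter (fun d => decide (d ≤ requested_date))
    if earlier_dates ≠ [] then PySem.List.pyGetD earlier_dates (-1) ""
    else PySem.List.pyGetD date_columns 0 ""

-- ===== PORT B =====
-- the backward for-loop of Source B: early return on equality, remember the first d < req seen
def nldScan (req first : String) (l : List String) (cand : Option String) : String :=
  match l with
  | [] => cand.getD first
  | d :: rest =>
      if d = req then req
      else nldScan req first rest (if cand.isNone && decide (d < req) then some d else cand)

def normalize_league_date_py_alt (requested_date : String) (date_columns : List String) : String :=
  if date_columns = [] then ""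
  else if requested_date = "" then PySem.List.pyGetD date_columns (-1) ""
  else
    let first := PySem.List.pyGetD date_columns 0 ""
    let last := PySem.List.pyGetD date_columns (-1) ""
    if requested_date ≤ first then first
    else if last ≤ requested_date then last
    else nldScan requested_date first date_columns.reverse none

-- ===== PRECONDITION & SPEC =====
def Spec_normalize_league_date_py (requested_date : String) (date_columns : List String) (out : String) : Prop := out = normalize_league_date_py_alt requested_date date_columns
instance (requested_date : String) (date_columns : List String) (out : String) : Decidable (Spec_normalize_league_date_py requested_date date_columns out) := by unfold Spec_normalize_league_date_py; infer_instance

-- ===== CLAIM (what is proved, stated in full; the proofs are below) =====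
def Claim_equal_normalize_league_date_py : Prop := ∀ (requested_date : String) (date_columns : List String), Dom_normalize_league_date_py requested_date date_columns → Spec_normalize_league_date_py requested_date date_columns (normalize_league_date_py requested_date date_columns)

-- ===== LEMMAS AND PROOFS =====

-- ===== VERDICT (by name: the statement is the Claim_ definition above) =====
lemma nldScan_some (req first c : String) (l : List String) :
    nldScan req first l (some c) = if req ∈ l then req else c := by
  induction l with
  | nil => simp [nldScan]
  | cons d rest ih =>
      by_cases h : d = req
      · simp [nldScan, h]
      · have hrd : ¬ req = d := fun hh => h hh.symm
        simp [nldScan, h, ih, hrd, List.mem_cons]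

lemma nldScan_none (req first : String) (l : List String) :
    nldScan req first l none =
      if req ∈ l then req
      else (l.find? (fun d => decide (d < req))).getD first := by
  induction l with
  | nil => simp [nldScan]
  | cons d rest ih =>
      by_cases h : d = req
      · simp [nldScan, h]
      · have hrd : ¬ req = d := fun hh => h hh.symm
        by_cases hlt : d < req
        · have hstep : nldScan req first (d :: rest) none = nldScan req first rest (some d) := by
            simp [nldScan, h, hlt]
          rw [hstep, nldScan_some, List.find?_cons_of_pos (by simpa using hlt)]
          by_cases hm : req ∈ rest
          · simp [hm, List.mem_cons]
          · simp [hm, hrd, List.mem_cons]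
        · have hstep : nldScan req first (d :: rest) none = nldScan req first rest none := by
            simp [nldScan, h, hlt]
          rw [hstep, ih, List.find?_cons_of_neg (by simpa using hlt)]
          by_cases hm : req ∈ rest
          · simp [hm, List.mem_cons]
          · simp [hm, hrd, List.mem_cons]

theorem normalize_league_date_py_spec : Claim_equal_normalize_league_date_py := by
  intro req cols _
  unfold Spec_normalize_league_date_py normalize_league_date_py normalize_league_date_py_alt
  by_cases h0 : cols = []
  · simp [h0]
  by_cases h1 : req = ""
  · simp [h0, h1]
  by_cases h2 : req ≤ PySem.List.pyGetD cols 0 ""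
  · simp [h0, h1, h2]
  by_cases h3 : PySem.List.pyGetD cols (-1) "" ≤ req
  · simp [h0, h1, h2, h3]
  simp only [if_neg h0, if_neg h1, if_neg h2, if_neg h3]
  rw [nldScan_none]
  simp only [List.mem_reverse]
  by_cases hm : req ∈ cols
  · simp [hm]
  · have hfilt : cols.filter (fun d => decide (d ≤ req)) = cols.filter (fun d => decide (d < req)) := by
      apply List.filter_congr
      intro x hx
      simp only [decide_eq_decide]
      constructor
      · intro hle
        rcases lt_or_eq_of_le hle with h | h
        · exact h
        · exact absurd (h ▸ hx) hm
      · exact le_of_lt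
    rw [if_neg hm, if_neg hm, hfilt,
      show cols.reverse.find? (fun d => decide (d < req)) = (cols.filter (fun d => decide (d < req))).getLast? from by
        rw [← List.head?_filter, List.filter_reverse, List.head?_reverse]]
    by_cases hfe : cols.filter (fun d => decide (d < req)) = []
    · rw [if_neg (not_not_intro hfe), hfe]
      rfl
    · rw [if_pos hfe, PySem.List.pyGetD_neg_one _ _ hfe,
        List.getLast?_eq_some_getLast hfe, Option.getD_some]
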